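-- pv_equiv track=rewrite | github.com/yugandharreddy0718/CSA0608 | DAA program day2 4.py | largestgrouppositions
-- ===== SOURCE A (Python) =====
-- def largestgrouppositions(s):
--     result = []
--     start = 0
--     for end in range(len(s)):
--         if end == len(s) - 1 or s[end] != s[end + 1]:
--             if end - start + 1 >= 3:
--                 result.append([start, end])
--             start = end + 1
--     return result
-- ===== SOURCE B (Python) =====
-- def largestgrouppositions(s):
--     n = len(s)
--     bounds = [0] + [i for i in range(1, n) if s[i] != s[i - 1]] + [n]
--     return [[a, b - 1] for a, b in zip(bounds, bounds[1:]) if b - a >= 3]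
-- ===== Notes on version B (the rewrite author's own statement) =====
-- stated objective: alternative
-- what changed: Replaces A's single stateful scan (per-character boundary test with a running start pointer) by staged passes: first build the list of run boundaries [0]+[i : s[i]!=s[i-1]]+[n], then map consecutive boundary pairs of width >= 3 to [a, b-1].
import Mathlib
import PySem

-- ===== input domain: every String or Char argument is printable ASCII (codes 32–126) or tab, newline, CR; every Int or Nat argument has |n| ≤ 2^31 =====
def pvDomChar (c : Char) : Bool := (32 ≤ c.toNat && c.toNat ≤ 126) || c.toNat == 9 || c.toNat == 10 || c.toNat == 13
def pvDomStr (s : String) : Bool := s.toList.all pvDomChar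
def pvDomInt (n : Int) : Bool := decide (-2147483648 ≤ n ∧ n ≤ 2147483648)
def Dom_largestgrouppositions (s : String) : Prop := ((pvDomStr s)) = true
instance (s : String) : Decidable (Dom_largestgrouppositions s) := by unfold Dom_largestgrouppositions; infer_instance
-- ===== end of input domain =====

-- B replaces A's single stateful scan by staged passes: first build the list of run boundaries,
-- then emit [a, b-1] for each consecutive boundary pair of width ≥ 3 (alternative decomposition, same O(n)).

-- ===== PORT A =====
-- loop body of A: for end in range(len(s)): if end == len(s)-1 or s[end] != s[end+1]: …
def stepA (cs : List Char) (n : Int) (st : List (List Int) × Int) (e : Int) :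
    List (List Int) × Int :=
  if e == n - 1 || (PySem.List.pyGet? cs e != PySem.List.pyGet? cs (e + 1)) then
    ((if e - st.2 + 1 ≥ 3 then st.1 ++ [[st.2, e]] else st.1), e + 1)
  else st

def largestgrouppositions (s : String) : List (List Int) :=
  ((PySem.List.pyRange 0 (s.toList.length : Int) 1).foldl
      (stepA s.toList (s.toList.length : Int)) ([], 0)).1

-- ===== PORT B =====
-- bounds = [0] + [i for i in range(1, n) if s[i] != s[i-1]] + [n]
def boundsB (cs : List Char) : List Int :=
  0 :: ((PySem.List.pyRange 1 (cs.length : Int) 1).filter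
        (fun i => PySem.List.pyGet? cs i != PySem.List.pyGet? cs (i - 1))) ++ [(cs.length : Int)]

-- [[a, b-1] for a, b in zip(bounds, bounds[1:]) if b - a >= 3]   (bounds[1:] = drop 1)
def largestgrouppositions_alt (s : String) : List (List Int) :=
  let bounds := boundsB s.toList
  ((bounds.zip (bounds.drop 1)).filter (fun p => 3 ≤ p.2 - p.1)).map
    (fun p => [p.1, p.2 - 1])

-- ===== PRECONDITION & SPEC =====
def Spec_largestgrouppositions (s : String) (out : List (List Int)) : Prop := out = largestgrouppositions_alt s
instance (s : String) (out : List (List Int)) : Decidable (Spec_largestgrouppositions s out) := by unfold Spec_largestgrouppositions; infer_instance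

-- ===== CLAIM (what is proved, stated in full; the proofs are below) =====
def Claim_equal_largestgrouppositions : Prop := ∀ (s : String), Dom_largestgrouppositions s → Spec_largestgrouppositions s (largestgrouppositions s)

-- ===== LEMMAS AND PROOFS =====

-- proof-side intermediate: A's scan expressed as a loop per maximal run
def bAdv (cs : List Char) (c : Char) (j : Nat) : Nat :=
  if h : j < cs.length then
    if cs[j] == c then bAdv cs c (j + 1) else j
  else j
termination_by cs.length - j

theorem bAdv_ge (cs : List Char) (c : Char) (j : Nat) : j ≤ bAdv cs c j := by
  fun_induction bAdv cs c j <;> omega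

def bLoop (cs : List Char) (i : Nat) (acc : List (List Int)) : List (List Int) :=
  if h : i < cs.length then
    let j := bAdv cs cs[i] (i + 1)
    bLoop cs j (if j - i ≥ 3 then acc ++ [[(i : Int), (j : Int) - 1]] else acc)
  else acc
termination_by cs.length - i
decreasing_by
  have := bAdv_ge cs cs[i] (i + 1); omega

theorem bAdv_le (cs : List Char) (c : Char) (j : Nat) (h : j ≤ cs.length) :
    bAdv cs c j ≤ cs.length := by
  fun_induction bAdv cs c j <;> omega

theorem bAdv_run (cs : List Char) (c : Char) (j : Nat) :
    ∀ e, j ≤ e → e < bAdv cs c j → cs[e]? = some c := by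
  fun_induction bAdv cs c j with
  | case1 j h hc ih =>
      intro e he1 he2
      rcases Nat.eq_or_lt_of_le he1 with rfl | hlt
      · simp [List.getElem?_eq_getElem h]; exact (beq_iff_eq.mp hc)
      · exact ih e hlt he2
  | case2 j h hc => intro e he1 he2; omega
  | case3 j h => intro e he1 he2; omega

theorem bAdv_stop (cs : List Char) (c : Char) (j : Nat) :
    cs[bAdv cs c j]? ≠ some c := by
  fun_induction bAdv cs c j with
  | case1 j h hc ih => exact ih
  | case2 j h hc =>
      simp [List.getElem?_eq_getElem h]
      intro hq; exact absurd (beq_iff_eq.mpr hq) (by simpa using hc)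
  | case3 j h =>
      rw [List.getElem?_eq_none (by omega)]; simp

-- every position of the maximal run starting at i holds cs[i]
theorem run_get (cs : List Char) (i : Nat) (h : i < cs.length) :
    ∀ e : Int, (i : Int) ≤ e → e < (bAdv cs cs[i] (i + 1) : Int) →
      PySem.List.pyGet? cs e = some cs[i] := by
  intro e h1 h2
  rw [show e = ((e.toNat : Nat) : Int) by omega, PySem.List.pyGet?_natCast]
  rcases Nat.eq_or_lt_of_le (show i ≤ e.toNat by omega) with heq | hlt
  · rw [← heq]; simp [List.getElem?_eq_getElem h]
  · exact bAdv_run cs cs[i] (i + 1) e.toNat (by omega) (by omega)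

-- inside a run (all of cs[a..b] equal to c, b < n) A's loop body is a no-op
theorem interior_fold (cs : List Char) (n : Int) (c : Char) (b : Int) :
    ∀ (k : Nat) (a : Int) (st : List (List Int) × Int), a + k = b → b < n →
      (∀ e : Int, a ≤ e → e ≤ b → PySem.List.pyGet? cs e = some c) →
      (PySem.List.pyRange a b 1).foldl (stepA cs n) st = st := by
  intro k
  induction k with
  | zero =>
      intro a st hab hbn hget
      rw [show b = a by omega, PySem.List.pyRange_one_eq_nil (le_refl a)]
      rfl
  | succ m ih =>
      intro a st hab hbn hget
      rw [PySem.List.pyRange_one_cons (by omega), List.foldl_cons]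
      have e1 : PySem.List.pyGet? cs a = some c := hget a (le_refl a) (by omega)
      have e2 : PySem.List.pyGet? cs (a + 1) = some c := hget (a + 1) (by omega) (by omega)
      have hne : (a == n - 1) = false := by simp; omega
      have hstep : stepA cs n st a = st := by
        simp [stepA, e1, e2, hne]
      rw [hstep]
      exact ih (a + 1) st (by omega) hbn (fun e h1 h2 => hget e (by omega) h2)

-- A's loop over one whole maximal run [i, j) appends exactly one record for that run
theorem run_fold (cs : List Char) (n : Int) (c : Char) (i j : Int) (acc : List (List Int))
    (hij : i < j) (hjn : j ≤ n)
    (hrun : ∀ e : Int, i ≤ e → e < j → PySem.List.pyGet? cs e = some c)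
    (hstop : PySem.List.pyGet? cs j ≠ some c) :
    (PySem.List.pyRange i j 1).foldl (stepA cs n) (acc, i)
      = ((if 3 ≤ j - i then acc ++ [[i, j - 1]] else acc), j) := by
  obtain ⟨b, rfl⟩ : ∃ b, j = b + 1 := ⟨j - 1, by omega⟩
  rw [PySem.List.pyRange_one_succ_right (by omega), List.foldl_append,
      interior_fold cs n c b (b - i).toNat i (acc, i) (by omega) (by omega)
        (fun e h1 h2 => hrun e h1 (by omega))]
  have e1 : PySem.List.pyGet? cs b = some c := hrun b (by omega) (by omega)
  have hb : (PySem.List.pyGet? cs b != PySem.List.pyGet? cs (b + 1)) = true := by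
    rw [e1]; exact bne_iff_ne.mpr (fun h => hstop h.symm)
  simp only [List.foldl_cons, List.foldl_nil, stepA, hb, Bool.or_true, if_true]
  rw [show b - i + 1 = b + 1 - i by omega, show b + 1 - 1 = b by omega]

-- A's remaining loop from run-start i equals the run loop from i
theorem keyA (cs : List Char) :
    ∀ (fuel i : Nat) (acc : List (List Int)), cs.length - i ≤ fuel → i ≤ cs.length →
      ((PySem.List.pyRange (i : Int) (cs.length : Int) 1).foldl
          (stepA cs (cs.length : Int)) (acc, (i : Int))).1 = bLoop cs i acc := by
  intro fuel
  induction fuel with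
  | zero =>
      intro i acc hf hi
      have : i = cs.length := by omega
      subst this
      rw [PySem.List.pyRange_one_eq_nil (le_refl _), bLoop]
      simp
  | succ m ih =>
      intro i acc hf hi
      by_cases h : i < cs.length
      · have hadv := bAdv_ge cs cs[i] (i + 1)
        have hle := bAdv_le cs cs[i] (i + 1) (by omega)
        set j := bAdv cs cs[i] (i + 1) with hj
        have hstop : PySem.List.pyGet? cs (j : Int) ≠ some cs[i] := by
          rw [PySem.List.pyGet?_natCast]; exact bAdv_stop cs cs[i] (i + 1)
        rw [PySem.List.pyRange_one_append (i : Int) (j : Int) (cs.length : Int)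
              (by omega) (by omega),
            List.foldl_append,
            run_fold cs (cs.length : Int) cs[i] (i : Int) (j : Int) acc
              (by omega) (by omega) (run_get cs i h) hstop]
        rw [ih j _ (by omega) (by omega)]
        conv_rhs => rw [bLoop]
        simp only [h, dite_true]
        rw [← hj]
        congr 1
        by_cases hd : 3 ≤ (j : Int) - (i : Int)
        · rw [if_pos hd, if_pos (by omega)]
        · rw [if_neg hd, if_neg (by omega)]
      · have : i = cs.length := by omega
        subst this
        rw [PySem.List.pyRange_one_eq_nil (le_refl _), bLoop]
        simp

-- proof-side view of B's zip/filter/map pipeline: consecutive-pair recursion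
def pairsF : List Int → List (List Int)
  | a :: b :: rest => (if 3 ≤ b - a then [[a, b - 1]] else []) ++ pairsF (b :: rest)
  | _ => []

theorem zip_pairs (l : List Int) :
    ((l.zip (l.drop 1)).filter (fun p => 3 ≤ p.2 - p.1)).map
      (fun p => [p.1, p.2 - 1]) = pairsF l := by
  induction l with
  | nil => rfl
  | cons a l ih =>
      cases l with
      | nil => rfl
      | cons b rest =>
          simp only [List.drop_succ_cons, List.drop_zero, List.zip_cons_cons,
            List.filter_cons, pairsF] at ih ⊢
          by_cases hd : 3 ≤ b - a
          · simp only [hd, decide_true, if_true, List.map_cons, ih]; rfl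
          · simp [hd, ih]

-- B's boundary filter from position a
def filterB (cs : List Char) (a : Int) : List Int :=
  (PySem.List.pyRange a (cs.length : Int) 1).filter
    (fun i => PySem.List.pyGet? cs i != PySem.List.pyGet? cs (i - 1))

-- the boundary filter steps run by run
theorem filterB_step (cs : List Char) (i : Nat) (h : i < cs.length) :
    filterB cs ((i : Int) + 1)
      = if bAdv cs cs[i] (i + 1) < cs.length
        then ((bAdv cs cs[i] (i + 1) : Nat) : Int)
              :: filterB cs (((bAdv cs cs[i] (i + 1) : Nat) : Int) + 1)
        else [] := by
  have hadv := bAdv_ge cs cs[i] (i + 1)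
  have hle := bAdv_le cs cs[i] (i + 1) (by omega)
  set j := bAdv cs cs[i] (i + 1) with hj
  unfold filterB
  rw [PySem.List.pyRange_one_append ((i : Int) + 1) (j : Int) (cs.length : Int)
        (by omega) (by omega), List.filter_append]
  have hnil : (PySem.List.pyRange ((i : Int) + 1) (j : Int) 1).filter
      (fun e => PySem.List.pyGet? cs e != PySem.List.pyGet? cs (e - 1)) = [] := by
    apply List.filter_eq_nil_iff.mpr
    intro e he
    rw [PySem.List.mem_pyRange_one] at he
    have e1 : PySem.List.pyGet? cs e = some cs[i] := run_get cs i h e (by omega) (by omega)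
    have e2 : PySem.List.pyGet? cs (e - 1) = some cs[i] :=
      run_get cs i h (e - 1) (by omega) (by omega)
    simp [e1, e2]
  rw [hnil, List.nil_append]
  by_cases hjn : j < cs.length
  · rw [if_pos hjn, PySem.List.pyRange_one_cons (by exact_mod_cast hjn), List.filter_cons]
    have e1 : PySem.List.pyGet? cs ((j : Nat) : Int) ≠ some cs[i] := by
      rw [PySem.List.pyGet?_natCast]; exact bAdv_stop cs cs[i] (i + 1)
    have e2 : PySem.List.pyGet? cs ((j : Int) - 1) = some cs[i] :=
      run_get cs i h ((j : Int) - 1) (by omega) (by omega)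
    have hpred : (PySem.List.pyGet? cs ((j : Nat) : Int)
        != PySem.List.pyGet? cs (((j : Nat) : Int) - 1)) = true := by
      rw [e2]; exact bne_iff_ne.mpr e1
    rw [hpred, if_pos rfl]
  · rw [if_neg hjn,
        PySem.List.pyRange_one_eq_nil (by omega), List.filter_nil]

-- bLoop produces exactly B's consecutive-pair records
theorem keyB (cs : List Char) :
    ∀ (fuel i : Nat) (acc : List (List Int)), cs.length - i ≤ fuel → i ≤ cs.length →
      bLoop cs i acc
        = acc ++ pairsF ((i : Int) :: filterB cs ((i : Int) + 1) ++ [(cs.length : Int)]) := by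
  intro fuel
  induction fuel with
  | zero =>
      intro i acc hf hi
      have : i = cs.length := by omega
      subst this
      rw [bLoop]
      simp only [lt_irrefl, dite_false]
      rw [show filterB cs ((cs.length : Int) + 1) = [] from by
        unfold filterB; rw [PySem.List.pyRange_one_eq_nil (by omega)]; rfl]
      simp [pairsF]
  | succ m ih =>
      intro i acc hf hi
      by_cases h : i < cs.length
      · have hadv := bAdv_ge cs cs[i] (i + 1)
        have hle := bAdv_le cs cs[i] (i + 1) (by omega)
        rw [bLoop]
        simp only [h, dite_true]
        set j := bAdv cs cs[i] (i + 1) with hj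
        rw [ih j _ (by omega) (by omega), filterB_step cs i h, ← hj]
        by_cases hjn : j < cs.length
        · rw [if_pos hjn]
          simp only [List.cons_append, pairsF]
          by_cases hd : 3 ≤ (j : Int) - (i : Int)
          · rw [if_pos hd, if_pos (by omega)]
            simp
          · rw [if_neg hd, if_neg (by omega)]
            simp
        · rw [if_neg hjn]
          have hjl : j = cs.length := by omega
          have hjc : (j : Int) = (cs.length : Int) := by omega
          rw [hjc]
          rw [show filterB cs ((cs.length : Int) + 1) = [] from by
            unfold filterB; rw [PySem.List.pyRange_one_eq_nil (by omega)]; rfl]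
          simp only [List.nil_append, List.cons_append,
            pairsF, List.append_nil]
          rw [if_neg (show ¬ (3 : Int) ≤ (cs.length : Int) - (cs.length : Int) by omega)]
          by_cases hd : 3 ≤ (cs.length : Int) - (i : Int)
          · rw [if_pos (show j - i ≥ 3 by omega), if_pos hd, List.append_nil]
          · rw [if_neg (show ¬ j - i ≥ 3 by omega), if_neg hd]
      · have : i = cs.length := by omega
        subst this
        rw [bLoop]
        simp only [lt_irrefl, dite_false]
        rw [show filterB cs ((cs.length : Int) + 1) = [] from by
          unfold filterB; rw [PySem.List.pyRange_one_eq_nil (by omega)]; rfl]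
        simp [pairsF]

-- ===== VERDICT (by name: the statement is the Claim_ definition above) =====
theorem largestgrouppositions_spec : Claim_equal_largestgrouppositions := by
  intro s _
  unfold Spec_largestgrouppositions largestgrouppositions largestgrouppositions_alt boundsB
  rw [zip_pairs]
  have hA := keyA s.toList s.toList.length 0 [] (by omega) (by omega)
  have hB := keyB s.toList s.toList.length 0 [] (by omega) (by omega)
  simp only [Int.natCast_zero] at hA hB
  rw [hA, hB]
  simp [filterB, zero_add]
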